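-- pv_equiv track=rewrite | github.com/cihangoksu/tutorials | HackerRank/Prepare/Python/Sets/NoIdea.py | report_happiness
-- ===== SOURCE A (Python) =====
-- from collections import Counter
--
-- def report_happiness(line1, line2, line3, line4):
--     M, N = line1.split()
--     arr = line2.split()
--
--     occurance_dict = Counter(arr)
--
--     A = set(line3.split())
--     B = set(line4.split())
--
--     happiness = 0
--     for key, value in occurance_dict.items():
--         if key in A: happiness+=value
--         if key in B: happiness-=value
--
--
--     return happiness
-- ===== SOURCE B (Python) =====
-- def report_happiness(line1, line2, line3, line4):
--     M, N = line1.split()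
--     arr = line2.split()
--
--     A = set(line3.split())
--     B = set(line4.split())
--
--     return sum(arr.count(a) for a in A) - sum(arr.count(b) for b in B)
-- ===== Notes on version B (the rewrite author's own statement) =====
-- stated objective: alternative
-- what changed: B inverts the traversal: instead of building a Counter over arr and scanning its distinct keys against the two sets, B iterates over the sets themselves and sums arr.count(x) for each set element, subtracting the B-set total from the A-set total (correct because elements outside both sets contribute 0 and set elements absent from arr count 0).
import Mathlib
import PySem

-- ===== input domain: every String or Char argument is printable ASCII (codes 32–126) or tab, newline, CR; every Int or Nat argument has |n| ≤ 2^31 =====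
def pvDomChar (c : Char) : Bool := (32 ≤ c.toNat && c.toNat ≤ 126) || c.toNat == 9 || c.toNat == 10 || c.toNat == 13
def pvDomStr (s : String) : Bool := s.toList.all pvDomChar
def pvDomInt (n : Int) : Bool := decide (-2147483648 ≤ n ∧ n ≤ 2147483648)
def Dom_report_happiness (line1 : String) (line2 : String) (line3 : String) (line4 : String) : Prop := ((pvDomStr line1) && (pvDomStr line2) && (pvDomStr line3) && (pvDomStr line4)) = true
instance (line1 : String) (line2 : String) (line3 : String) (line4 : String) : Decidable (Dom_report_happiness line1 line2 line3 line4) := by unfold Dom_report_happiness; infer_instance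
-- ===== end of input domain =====

-- B inverts the traversal: it iterates over the two sets and sums arr.count per set element, instead of scanning a Counter's keys against the sets (alternative decomposition; not faster).

-- ===== PORT A =====
def report_happiness (line1 : String) (line2 : String) (line3 : String) (line4 : String) : Int :=
  match PySem.Str.split₀ line1 with
  | [_M, _N] =>
    let arr := PySem.Str.split₀ line2
    let occurance_dict := PySem.Dict.counter arr
    let A := PySem.Set.ofList (PySem.Str.split₀ line3)
    let B := PySem.Set.ofList (PySem.Str.split₀ line4)
    occurance_dict.items.foldl (fun happiness kv =>
      let happiness := if PySem.Set.contains A kv.1 then happiness + kv.2 else happiness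
      if PySem.Set.contains B kv.1 then happiness - kv.2 else happiness) 0
  | _ => 0  -- ValueError from the unpack 'M, N = line1.split()' (excluded by Pre_)

-- ===== PORT B =====
def report_happiness_alt (line1 : String) (line2 : String) (line3 : String) (line4 : String) : Int :=
  if (PySem.Str.split₀ line1).length = 2 then  -- the unpack 'M, N = line1.split()' succeeds iff exactly 2 words
    let arr := PySem.Str.split₀ line2
    let A := PySem.Set.ofList (PySem.Str.split₀ line3)
    let B := PySem.Set.ofList (PySem.Str.split₀ line4)
    (A.map (fun a => (PySem.List.count arr a : Int))).sum
      - (B.map (fun b => (PySem.List.count arr b : Int))).sum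
  else 0  -- ValueError from the unpack (same as A)

-- ===== PRECONDITION & SPEC =====
-- Pre_ excludes exactly the inputs where the unpack 'M, N = line1.split()' raises ValueError (both A and B raise there).
def Pre_report_happiness (line1 : String) (line2 : String) (line3 : String) (line4 : String) : Prop :=
  (PySem.Str.split₀ line1).length = 2
instance (line1 : String) (line2 : String) (line3 : String) (line4 : String) : Decidable (Pre_report_happiness line1 line2 line3 line4) := by unfold Pre_report_happiness; infer_instance
def pvWitness_report_happiness : String × String × String × String := ("3 2", "1 2 1 3", "3 1", "2")

def Spec_report_happiness (line1 : String) (line2 : String) (line3 : String) (line4 : String) (out : Int) : Prop := out = report_happiness_alt line1 line2 line3 line4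
instance (line1 : String) (line2 : String) (line3 : String) (line4 : String) (out : Int) : Decidable (Spec_report_happiness line1 line2 line3 line4 out) := by unfold Spec_report_happiness; infer_instance

-- ===== CLAIM (what is proved, stated in full; the proofs are below) =====
def Claim_equal_report_happiness : Prop := ∀ (line1 : String) (line2 : String) (line3 : String) (line4 : String), Dom_report_happiness line1 line2 line3 line4 → Pre_report_happiness line1 line2 line3 line4 → Spec_report_happiness line1 line2 line3 line4 (report_happiness line1 line2 line3 line4)

-- ===== LEMMAS AND PROOFS =====

-- sum of pointwise differences splits
theorem pv_sum_map_sub (s : List String) (f g : String → Int) :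
    (s.map (fun k => f k - g k)).sum = (s.map f).sum - (s.map g).sum := by
  induction s with
  | nil => simp
  | cons a s ih => simp [ih]; ring

-- a 0-guarded sum is the sum over the filtered list
theorem pv_sum_map_ite_filter (s : List String) (p : String → Bool) (f : String → Int) :
    (s.map (fun k => if p k then f k else 0)).sum = ((s.filter p).map f).sum := by
  induction s with
  | nil => simp
  | cons a s ih => by_cases h : p a <;> simp [h, ih]

-- elements absent from arr count 0, so they can be filtered out of the sum
theorem pv_sum_count_filter (s arr : List String) :
    (s.map (fun k => (arr.count k : Int))).sum
      = ((s.filter (fun k => decide (k ∈ arr))).map (fun k => (arr.count k : Int))).sum := by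
  induction s with
  | nil => simp
  | cons a s ih =>
    by_cases h : a ∈ arr
    · simp [h, ih]
    · simp [h, ih, List.count_eq_zero.mpr h]

-- key lemma: sum over arr's distinct keys restricted to a nodup set S = sum over S of arr.count
theorem pv_keys_vs_set (arr S : List String) (hS : S.Nodup) :
    (((PySem.Set.ofList arr).map (fun k => if PySem.Set.contains S k then (arr.count k : Int) else 0)).sum)
      = (S.map (fun s => (arr.count s : Int))).sum := by
  rw [pv_sum_map_ite_filter, pv_sum_count_filter S arr]
  have hperm : ((PySem.Set.ofList arr).filter (fun k => PySem.Set.contains S k)).Perm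
      (S.filter (fun k => decide (k ∈ arr))) := by
    refine (List.perm_ext_iff_of_nodup (List.Nodup.filter _ (PySem.Set.nodup_ofList arr))
      (List.Nodup.filter _ hS)).mpr ?_
    intro x
    simp [List.mem_filter, PySem.Set.mem_ofList, PySem.Set.contains, and_comm]
  exact (hperm.map _).sum_eq

-- the A-side fold is a sum of per-key signed weights over the Counter's keys
theorem pv_fold_A (arr A B : List String) :
    ((PySem.Dict.counter arr).items.foldl (fun happiness (kv : String × Int) =>
      let happiness := if PySem.Set.contains A kv.1 then happiness + kv.2 else happiness
      if PySem.Set.contains B kv.1 then happiness - kv.2 else happiness) 0 : Int)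
    = ((PySem.Set.ofList arr).map (fun k =>
        (if PySem.Set.contains A k then (arr.count k : Int) else 0)
          - (if PySem.Set.contains B k then (arr.count k : Int) else 0))).sum := by
  rw [PySem.Dict.items_counter, List.foldl_map,
      PySem.List.foldl_congr_mem _ _ (fun (acc : Int) k =>
        acc + ((if PySem.Set.contains A k then (arr.count k : Int) else 0)
          - (if PySem.Set.contains B k then (arr.count k : Int) else 0))) 0
        (by
          intro acc k _
          simp only []
          by_cases h1 : k ∈ A <;> by_cases h2 : k ∈ B <;>
            simp [PySem.Set.contains, h1, h2] <;> ring),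
      PySem.List.foldl_add, zero_add]

-- combining the three lemmas: A's fold equals B's two set-sums
theorem pv_core (arr SA SB : List String) :
    ((PySem.Dict.counter arr).items.foldl (fun happiness (kv : String × Int) =>
      let happiness := if PySem.Set.contains (PySem.Set.ofList SA) kv.1 then happiness + kv.2 else happiness
      if PySem.Set.contains (PySem.Set.ofList SB) kv.1 then happiness - kv.2 else happiness) 0 : Int)
    = ((PySem.Set.ofList SA).map (fun a => (arr.count a : Int))).sum
        - ((PySem.Set.ofList SB).map (fun b => (arr.count b : Int))).sum := by
  rw [pv_fold_A, pv_sum_map_sub,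
      pv_keys_vs_set _ _ (PySem.Set.nodup_ofList SA),
      pv_keys_vs_set _ _ (PySem.Set.nodup_ofList SB)]

-- ===== VERDICT (by name: the statement is the Claim_ definition above) =====
theorem report_happiness_spec : Claim_equal_report_happiness := by
  intro line1 line2 line3 line4 _ hpre
  unfold Pre_report_happiness at hpre
  unfold Spec_report_happiness report_happiness report_happiness_alt
  cases h : PySem.Str.split₀ line1 with
  | nil => rw [h] at hpre; simp at hpre
  | cons a t =>
    cases t with
    | nil => rw [h] at hpre; simp at hpre
    | cons b t' =>
      cases t' with
      | cons c t'' => rw [h] at hpre; simp at hpre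
      | nil => simpa [h] using pv_core (PySem.Str.split₀ line2) (PySem.Str.split₀ line3) (PySem.Str.split₀ line4)
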